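-- pv_equiv track=rewrite | github.com/faulknerpearce/advent_of_code | 2024/day_5/part_1.py | create_rules_map
-- ===== SOURCE A (Python) =====
-- def create_rules_map(rules):
--     '''Creates a mapping of rules where each key maps to a list of its associated values that come after it.'''
--     rules_map = {}
--
--     for rule in rules:
--
--         if rules_map.get(rule[0]):
--             rules_map[rule[0]].append(rule[1])
--         else:
--             rules_map.update({rule[0]: [rule[1]]})
--
--     return rules_map
-- ===== SOURCE B (Python) =====
-- def create_rules_map(rules):
--     '''Creates a mapping of rules where each key maps to a list of its associated values that come after it.'''
--     keys = list(dict.fromkeys(a for a, _ in rules))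
--     return {k: [b for a, b in rules if a == k] for k in keys}
-- ===== Notes on version B (the rewrite author's own statement) =====
-- stated objective: idiomatic
-- what changed: Replaces the incremental get/append-or-create dict loop with a two-pass comprehension: dedup the keys in first-appearance order via dict.fromkeys, then build each successor list with one filtering comprehension over the rules.
import Mathlib
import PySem

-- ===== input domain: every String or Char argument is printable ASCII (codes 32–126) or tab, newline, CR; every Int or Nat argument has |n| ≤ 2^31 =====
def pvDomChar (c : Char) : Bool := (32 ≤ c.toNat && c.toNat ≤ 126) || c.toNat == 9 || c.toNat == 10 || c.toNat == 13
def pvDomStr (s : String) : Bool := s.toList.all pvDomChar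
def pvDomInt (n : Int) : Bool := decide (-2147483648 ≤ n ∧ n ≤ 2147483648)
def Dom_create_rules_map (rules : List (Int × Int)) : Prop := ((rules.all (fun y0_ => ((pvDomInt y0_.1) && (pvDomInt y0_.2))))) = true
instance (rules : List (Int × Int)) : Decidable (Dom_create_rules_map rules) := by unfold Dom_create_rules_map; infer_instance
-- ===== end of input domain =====

-- B replaces A's incremental get/append-or-create dict loop with a two-pass build
-- (dedup the keys in first-appearance order, then one filtering comprehension per key);
-- objective: idiomatic. Keys and successor lists come out in the same order as A's.

-- ===== PORT A =====
-- rules_map = {}; for rule in rules: if rules_map.get(rule[0]): append  else: update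
def create_rules_map (rules : List (Int × Int)) : List (Int × List Int) :=
  (rules.foldl (fun m r =>
      match m.get? r.1 with
      | some l => if l.isEmpty = false then m.insert r.1 (l ++ [r.2])   -- truthy list: append
                  else m.insert r.1 [r.2]                               -- falsy (empty) list
      | none   => m.insert r.1 [r.2]) (PySem.Dict.empty : PySem.Dict Int (List Int))).items

-- ===== PORT B =====
-- keys = list(dict.fromkeys(a for a,_ in rules)); {k: [b for a,b in rules if a == k] for k in keys}
def create_rules_map_alt (rules : List (Int × Int)) : List (Int × List Int) :=
  (PySem.List.dedup (rules.map (fun r => r.1))).map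
    (fun k => (k, (rules.filter (fun r => r.1 == k)).map (fun r => r.2)))

-- ===== PRECONDITION & SPEC =====
def Spec_create_rules_map (rules : List (Int × Int)) (out : List (Int × List Int)) : Prop := out = create_rules_map_alt rules
instance (rules : List (Int × Int)) (out : List (Int × List Int)) : Decidable (Spec_create_rules_map rules out) := by unfold Spec_create_rules_map; infer_instance

-- ===== CLAIM (what is proved, stated in full; the proofs are below) =====
def Claim_equal_create_rules_map : Prop := ∀ (rules : List (Int × Int)), Dom_create_rules_map rules → Spec_create_rules_map rules (create_rules_map rules)

-- ===== LEMMAS AND PROOFS =====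

-- A's step (get-then-append-or-insert, with Python's truthiness test) is exactly modify-append.
theorem stepA_eq_modify (m : PySem.Dict Int (List Int)) (r : Int × Int) :
    (match m.get? r.1 with
     | some l => if l.isEmpty = false then m.insert r.1 (l ++ [r.2])
                 else m.insert r.1 [r.2]
     | none   => m.insert r.1 [r.2]) = m.modify r.1 [] (· ++ [r.2]) := by
  simp only [PySem.Dict.modify, PySem.Dict.getD_eq_get?_getD]
  cases h : m.get? r.1 with
  | none => simp
  | some l => cases l <;> simp

theorem foldlA_eq_foldl_modify (rules : List (Int × Int)) :
    rules.foldl (fun m r =>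
      match m.get? r.1 with
      | some l => if l.isEmpty = false then m.insert r.1 (l ++ [r.2])
                  else m.insert r.1 [r.2]
      | none   => m.insert r.1 [r.2]) (PySem.Dict.empty : PySem.Dict Int (List Int))
    = rules.foldl (fun m r => m.modify r.1 [] (· ++ [r.2])) PySem.Dict.empty := by
  exact PySem.List.foldl_congr_mem rules _ _ _ (fun m r _ => stepA_eq_modify m r)

-- ===== VERDICT (by name: the statement is the Claim_ definition above) =====
theorem create_rules_map_spec : Claim_equal_create_rules_map := by
  intro rules _
  unfold Spec_create_rules_map create_rules_map create_rules_map_alt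
  rw [foldlA_eq_foldl_modify]
  set d := rules.foldl (fun m r => m.modify r.1 [] (· ++ [r.2]))
      (PySem.Dict.empty : PySem.Dict Int (List Int)) with hd
  have hnd : d.keys.Nodup := by
    rw [hd]
    exact PySem.Dict.nodup_keys_foldl_modify_key rules (fun r => r.1) [] (fun _ r v => v ++ [r.2])
      PySem.Dict.empty (by simp)
  have hkeys : d.keys = PySem.List.dedup (rules.map (fun r => r.1)) := by
    rw [hd, PySem.Dict.keys_foldl_modify_key]
    simp [PySem.Set.update, PySem.Set.ofList, PySem.Dict.keys_empty]
  have hgetD : ∀ k, d.getD k [] = (rules.filter (fun r => r.1 == k)).map (fun r => r.2) := by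
    intro k
    rw [hd, PySem.Dict.getD_foldl_modify_append]
    simp [PySem.Dict.getD_empty]
  rw [PySem.Dict.items_eq_map_keys d hnd [], hkeys]
  exact List.map_congr_left (fun k _ => by rw [hgetD k])
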